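-- pv_equiv track=rewrite | github.com/cogent3/cogent3 | cogent/align/traceback.py | gap_traceback
-- ===== SOURCE A (Python) =====
-- def gap_traceback(aligned_positions):
--     """Gap Vectors from state matrix and ending point"""
--     consuming = [False, False]
--     starts = [None, None]
--     ends = [None, None]
--     gap_vectors = [[], []]
--     for (a, posn) in enumerate(aligned_positions):
--         for dimension in [0, 1]:
--             delta = posn[dimension] is not None
--             if delta:
--                 if starts[dimension] is None:
--                     starts[dimension] = posn[dimension]
--                 ends[dimension] = posn[dimension] + 1
--             if consuming[dimension] != delta:
--                 gap_vectors[dimension].append(a)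
--                 consuming[dimension] = delta
--     a += 1
--     for dimension in [0,1]:
--         gv = gap_vectors[dimension]
--         if consuming[dimension]:
--             gv.append(a)
--         gap_vectors[dimension] = [
--             (gv[i], gv[i+1]) for i in range(0, len(gv), 2)]
--     return (starts, ends, gap_vectors, a)
-- ===== SOURCE B (Python) =====
-- def _dim(vals):
--     """starts/ends/run-intervals for one dimension's list of optional positions."""
--     nz = [(i, v) for i, v in enumerate(vals) if v is not None]
--     runs = []
--     for i, _ in nz:
--         if runs and runs[-1][1] == i:
--             runs[-1] = (runs[-1][0], i + 1)
--         else: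
--             runs.append((i, i + 1))
--     start = nz[0][1] if nz else None
--     end = nz[-1][1] + 1 if nz else None
--     return start, end, runs
--
--
-- def gap_traceback(aligned_positions):
--     """Gap Vectors from state matrix and ending point"""
--     r = [_dim([posn[d] for posn in aligned_positions]) for d in [0, 1]]
--     starts = [x[0] for x in r]
--     ends = [x[1] for x in r]
--     gap_vectors = [x[2] for x in r]
--     return (starts, ends, gap_vectors, len(aligned_positions))
-- ===== Notes on version B (the rewrite author's own statement) =====
-- stated objective: alternative
-- what changed: Replaced the single consuming-flag state machine that records toggle indices and pairs them afterwards by a per-dimension pass that collects the non-None (index,value) positions once and groups maximal runs of consecutive indices directly into interval tuples, with starts/ends read off the first and last collected entry.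
import Mathlib
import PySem

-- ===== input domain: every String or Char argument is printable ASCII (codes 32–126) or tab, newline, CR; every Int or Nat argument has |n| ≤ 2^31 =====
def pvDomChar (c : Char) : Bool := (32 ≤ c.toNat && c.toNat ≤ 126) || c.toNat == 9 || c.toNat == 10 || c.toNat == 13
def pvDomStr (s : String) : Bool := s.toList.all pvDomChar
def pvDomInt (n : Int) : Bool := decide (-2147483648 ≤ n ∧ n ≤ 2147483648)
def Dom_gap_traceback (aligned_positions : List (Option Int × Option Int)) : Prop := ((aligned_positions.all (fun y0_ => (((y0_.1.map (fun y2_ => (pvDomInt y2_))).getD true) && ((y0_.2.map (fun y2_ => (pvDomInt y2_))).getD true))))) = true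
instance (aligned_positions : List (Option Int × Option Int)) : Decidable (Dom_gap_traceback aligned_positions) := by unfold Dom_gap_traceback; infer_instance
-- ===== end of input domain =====

-- B replaces A's consuming-flag toggle-point state machine by a per-dimension pass that collects
-- non-None (index,value) positions and groups consecutive-index runs into intervals directly
-- (alternative decomposition, same cost); Pre_ excludes the empty list, on which A raises.


-- ===== PORT A =====
structure DimSt where
  consuming : Bool
  start : Option Int
  stop : Option Int
  gv : List Int
deriving Repr, DecidableEq

-- one dimension's body of A's inner `for dimension in [0, 1]` loop
def stepDim (st : DimSt) (a : Int) (o : Option Int) : DimSt :=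
  let delta := o.isSome
  let start := if delta then (if st.start = none then o else st.start) else st.start
  let stop := match o with
    | some v => some (v + 1)
    | none => st.stop
  let gv := if st.consuming != delta then st.gv ++ [a] else st.gv
  ⟨delta, start, stop, gv⟩

-- the list comprehension [(gv[i], gv[i+1]) for i in range(0, len(gv), 2)] (gv always has even length)
def pairUp : List Int → List (Int × Int)
  | x :: y :: t => (x, y) :: pairUp t
  | _ => []

def gap_traceback (aligned_positions : List (Option Int × Option Int)) : List (Option Int) × List (Option Int) × (List (List (Int × Int))) × Int :=
  let init : DimSt := ⟨false, none, none, []⟩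
  -- `a` tracked as the third state component (-1 when the loop never runs; such inputs are outside Pre_)
  let st := (PySem.List.enumerate aligned_positions).foldl
    (fun (s : DimSt × DimSt × Int) (p : Int × (Option Int × Option Int)) =>
      (stepDim s.1 p.1 p.2.1, stepDim s.2.1 p.1 p.2.2, p.1)) (init, init, -1)
  let a := st.2.2 + 1
  let fin := fun (d : DimSt) => pairUp (if d.consuming then d.gv ++ [a] else d.gv)
  ([st.1.start, st.2.1.start], [st.1.stop, st.2.1.stop], [fin st.1, fin st.2.1], a)

-- ===== PORT B =====
-- B's helper _dim(vals)
def dimAlt (vals : List (Option Int)) : Option Int × Option Int × List (Int × Int) :=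
  let nz := (PySem.List.enumerate vals).filterMap (fun p => p.2.map (fun v => (p.1, v)))
  let runs := nz.foldl (fun (runs : List (Int × Int)) (p : Int × Int) =>
    match runs.getLast? with
    | some (s, e) => if e = p.1 then runs.dropLast ++ [(s, p.1 + 1)] else runs ++ [(p.1, p.1 + 1)]
    | none => [(p.1, p.1 + 1)]) []
  (nz.head?.map (·.2), (nz.getLast?.map (·.2)).map (· + 1), runs)

def gap_traceback_alt (aligned_positions : List (Option Int × Option Int)) : List (Option Int) × List (Option Int) × (List (List (Int × Int))) × Int :=
  let r0 := dimAlt (aligned_positions.map (·.1))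
  let r1 := dimAlt (aligned_positions.map (·.2))
  ([r0.1, r1.1], [r0.2.1, r1.2.1], [r0.2.2, r1.2.2], (aligned_positions.length : Int))

-- ===== PRECONDITION & SPEC =====
-- A raises UnboundLocalError on the empty list (its loop variable `a` is never bound), so Pre_ excludes exactly that input.
def Pre_gap_traceback (aligned_positions : List (Option Int × Option Int)) : Prop := aligned_positions ≠ []
instance (aligned_positions : List (Option Int × Option Int)) : Decidable (Pre_gap_traceback aligned_positions) := by unfold Pre_gap_traceback; infer_instance

def pvWitness_gap_traceback : (List (Option Int × Option Int)) := [(some 0, none), (some 1, some 4)]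

def Spec_gap_traceback (aligned_positions : List (Option Int × Option Int)) (out : List (Option Int) × List (Option Int) × (List (List (Int × Int))) × Int) : Prop := out = gap_traceback_alt aligned_positions
instance (aligned_positions : List (Option Int × Option Int)) (out : List (Option Int) × List (Option Int) × (List (List (Int × Int))) × Int) : Decidable (Spec_gap_traceback aligned_positions out) := by unfold Spec_gap_traceback; infer_instance

-- ===== CLAIM (what is proved, stated in full; the proofs are below) =====
def Claim_equal_gap_traceback : Prop := ∀ (aligned_positions : List (Option Int × Option Int)), Dom_gap_traceback aligned_positions → Pre_gap_traceback aligned_positions → Spec_gap_traceback aligned_positions (gap_traceback aligned_positions)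

-- ===== LEMMAS AND PROOFS =====

-- canonical per-dimension data the two per-dimension computations are both reduced to
def firstSome : List (Option Int) → Option Int
  | [] => none
  | none :: t => firstSome t
  | some v :: _ => some v

def lastSome : List (Option Int) → Option Int
  | [] => none
  | o :: t => match lastSome t with
    | some v => some v
    | none => o

-- maximal runs of non-None entries as index intervals; `inRun = some s` means a run started at index s is open, k is the current index
def runsC (inRun : Option Int) (k : Int) : List (Option Int) → List (Int × Int)
  | [] => match inRun with
    | some s => [(s, k)]
    | none => []
  | none :: t => match inRun with
    | some s => (s, k) :: runsC none (k + 1) t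
    | none => runsC none (k + 1) t
  | some _ :: t => match inRun with
    | some s => runsC (some s) (k + 1) t
    | none => runsC (some k) (k + 1) t

def foldDim (st : DimSt) (l : List (Int × Option Int)) : DimSt :=
  l.foldl (fun s p => stepDim s p.1 p.2) st

def foldB (runs : List (Int × Int)) (nz : List (Int × Int)) : List (Int × Int) :=
  nz.foldl (fun (runs : List (Int × Int)) (p : Int × Int) =>
    match runs.getLast? with
    | some (s, e) => if e = p.1 then runs.dropLast ++ [(s, p.1 + 1)] else runs ++ [(p.1, p.1 + 1)]
    | none => [(p.1, p.1 + 1)]) runs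

def nzOf (k : Int) (vals : List (Option Int)) : List (Int × Int) :=
  (PySem.List.enumerate vals k).filterMap (fun p => p.2.map (fun v => (p.1, v)))

lemma pairUp_append (G rest : List Int) (hG : G.length % 2 = 0) :
    pairUp (G ++ rest) = pairUp G ++ pairUp rest := by
  induction G using pairUp.induct with
  | case1 x y t ih =>
      simp only [List.cons_append, pairUp, List.length_cons] at *
      rw [ih (by omega)]
  | case2 G h =>
      rcases G with _ | ⟨x, _ | ⟨y, t⟩⟩
      · simp [pairUp]
      · simp at hG
      · exact absurd rfl (h x y t)

lemma fold_split (xs : List (Option Int × Option Int)) : ∀ (s : Int) (i1 i2 : DimSt) (a0 : Int),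
    (PySem.List.enumerate xs s).foldl
      (fun (st : DimSt × DimSt × Int) (p : Int × (Option Int × Option Int)) =>
        (stepDim st.1 p.1 p.2.1, stepDim st.2.1 p.1 p.2.2, p.1)) (i1, i2, a0)
    = (foldDim i1 (PySem.List.enumerate (xs.map (·.1)) s),
       foldDim i2 (PySem.List.enumerate (xs.map (·.2)) s),
       if xs = [] then a0 else s + xs.length - 1) := by
  induction xs with
  | nil => intro s i1 i2 a0; simp [PySem.List.enumerate_nil, foldDim]
  | cons p t ih =>
      intro s i1 i2 a0
      simp only [PySem.List.enumerate_cons, List.foldl_cons, List.map_cons, foldDim,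
        List.length_cons, reduceCtorEq, if_false]
      rw [ih]
      simp only [foldDim]
      rcases t with _ | ⟨q, u⟩
      · simp
      · simp only [List.length_cons, reduceCtorEq, if_false, Prod.mk.injEq]
        refine ⟨trivial, trivial, ?_⟩
        push_cast
        ring

lemma A_start (vals : List (Option Int)) : ∀ (k : Int) (c : Bool) (s e : Option Int) (G : List Int),
    (foldDim ⟨c, s, e, G⟩ (PySem.List.enumerate vals k)).start
    = (match s with | some _ => s | none => firstSome vals) := by
  induction vals with
  | nil => intro k c s e G; cases s <;> simp [PySem.List.enumerate_nil, foldDim, firstSome]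
  | cons o t ih =>
      intro k c s e G
      simp only [PySem.List.enumerate_cons, foldDim, List.foldl_cons]
      rw [show (List.foldl (fun s p => stepDim s p.1 p.2) (stepDim ⟨c, s, e, G⟩ k o)
        (PySem.List.enumerate t (k + 1)))
        = foldDim (stepDim ⟨c, s, e, G⟩ k o) (PySem.List.enumerate t (k + 1)) from rfl]
      cases o <;> cases s <;>
        simp [stepDim, ih, firstSome]

lemma A_stop (vals : List (Option Int)) : ∀ (k : Int) (c : Bool) (s e : Option Int) (G : List Int),
    (foldDim ⟨c, s, e, G⟩ (PySem.List.enumerate vals k)).stop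
    = (match lastSome vals with | some v => some (v + 1) | none => e) := by
  induction vals with
  | nil => intro k c s e G; simp [PySem.List.enumerate_nil, foldDim, lastSome]
  | cons o t ih =>
      intro k c s e G
      simp only [PySem.List.enumerate_cons, foldDim, List.foldl_cons]
      rw [show (List.foldl (fun s p => stepDim s p.1 p.2) (stepDim ⟨c, s, e, G⟩ k o)
        (PySem.List.enumerate t (k + 1)))
        = foldDim (stepDim ⟨c, s, e, G⟩ k o) (PySem.List.enumerate t (k + 1)) from rfl]
      cases h : lastSome t <;> cases o <;>
        simp [stepDim, ih, lastSome, h]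

def finishRuns (d : DimSt) (n : Int) : List (Int × Int) :=
  pairUp (if d.consuming then d.gv ++ [n] else d.gv)

lemma foldDim_cons (st : DimSt) (p : Int × Option Int) (l : List (Int × Option Int)) :
    foldDim st (p :: l) = foldDim (stepDim st p.1 p.2) l := rfl

lemma A_runs (vals : List (Option Int)) : ∀ (k : Int) (inRun : Option Int) (G : List Int)
    (s e : Option Int), G.length % 2 = 0 →
    finishRuns (foldDim ⟨inRun.isSome, s, e, G ++ inRun.toList⟩ (PySem.List.enumerate vals k))
      (k + vals.length)
    = pairUp G ++ runsC inRun k vals := by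
  induction vals with
  | nil =>
      intro k inRun G s e hG
      cases inRun with
      | none => simp [PySem.List.enumerate_nil, foldDim, finishRuns, runsC]
      | some s0 =>
          simp only [PySem.List.enumerate_nil, foldDim, List.foldl_nil, finishRuns,
            Option.isSome_some, Option.toList_some, if_pos, List.length_nil, Nat.cast_zero,
            add_zero, runsC, List.append_assoc]
          rw [pairUp_append G ([s0] ++ [k]) hG]
          simp [pairUp]
  | cons o t ih =>
      intro k inRun G s e hG
      rw [PySem.List.enumerate_cons, foldDim_cons]
      have hlen : k + ((o :: t).length : Int) = (k + 1) + (t.length : Int) := by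
        simp only [List.length_cons]; push_cast; ring
      rw [hlen]
      cases o with
      | none =>
          cases inRun with
          | none =>
              have hst : stepDim ⟨(none : Option Int).isSome, s, e, G ++ (none : Option Int).toList⟩ k none
                  = ⟨(none : Option Int).isSome, s, e, G ++ (none : Option Int).toList⟩ := by
                simp [stepDim]
              rw [hst, ih (k + 1) none G s e hG]
              simp [runsC]
          | some s0 =>
              have hst : stepDim ⟨(some s0).isSome, s, e, G ++ (some s0).toList⟩ k none
                  = ⟨(none : Option Int).isSome, s, e, (G ++ [s0, k]) ++ (none : Option Int).toList⟩ := by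
                simp [stepDim]
              rw [hst, ih (k + 1) none (G ++ [s0, k]) s e (by simp; omega)]
              rw [pairUp_append G [s0, k] hG]
              simp [pairUp, runsC]
      | some v =>
          cases inRun with
          | none =>
              have hst : stepDim ⟨(none : Option Int).isSome, s, e, G ++ (none : Option Int).toList⟩ k (some v)
                  = ⟨(some k).isSome, if s = none then some v else s, some (v + 1), G ++ (some k).toList⟩ := by
                simp [stepDim]
              rw [hst, ih (k + 1) (some k) G _ _ hG]
              simp [runsC]
          | some s0 =>
              have hst : stepDim ⟨(some s0).isSome, s, e, G ++ (some s0).toList⟩ k (some v)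
                  = ⟨(some s0).isSome, if s = none then some v else s, some (v + 1), G ++ (some s0).toList⟩ := by
                simp [stepDim]
              rw [hst, ih (k + 1) (some s0) G _ _ hG]
              simp [runsC]

lemma nzOf_nil (k : Int) : nzOf k [] = [] := by
  simp [nzOf, PySem.List.enumerate_nil]

lemma nzOf_cons_none (k : Int) (t : List (Option Int)) : nzOf k (none :: t) = nzOf (k + 1) t := by
  simp [nzOf, PySem.List.enumerate_cons]

lemma nzOf_cons_some (k v : Int) (t : List (Option Int)) :
    nzOf k (some v :: t) = (k, v) :: nzOf (k + 1) t := by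
  simp [nzOf, PySem.List.enumerate_cons]

lemma foldB_cons (G : List (Int × Int)) (p : Int × Int) (l : List (Int × Int)) :
    foldB G (p :: l) = foldB (match G.getLast? with
      | some (s, e) => if e = p.1 then G.dropLast ++ [(s, p.1 + 1)] else G ++ [(p.1, p.1 + 1)]
      | none => [(p.1, p.1 + 1)]) l := rfl

lemma B_runs (vals : List (Option Int)) :
    (∀ (k : Int) (G : List (Int × Int)),
      (G = [] ∨ ∃ pre s e, G = pre ++ [(s, e)] ∧ e < k) →
      foldB G (nzOf k vals) = G ++ runsC none k vals)
    ∧ (∀ (k : Int) (G : List (Int × Int)) (s : Int),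
      foldB (G ++ [(s, k)]) (nzOf k vals) = G ++ runsC (some s) k vals) := by
  induction vals with
  | nil =>
      constructor
      · intro k G _; simp [nzOf_nil, foldB, runsC]
      · intro k G s; simp [nzOf_nil, foldB, runsC]
  | cons o t ih =>
      obtain ⟨ih2, ih1⟩ := ih
      constructor
      · intro k G hG
        cases o with
        | none =>
            rw [nzOf_cons_none]
            have h2 := ih2 (k + 1) G (by
              rcases hG with rfl | ⟨pre, s0, e0, rfl, he⟩
              · exact Or.inl rfl
              · exact Or.inr ⟨pre, s0, e0, rfl, by omega⟩)
            simp [runsC, h2]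
        | some v =>
            rw [nzOf_cons_some, foldB_cons]
            rcases hG with rfl | ⟨pre, s0, e0, rfl, he⟩
            · have h1 := ih1 (k + 1) [] k
              simpa [runsC] using h1
            · have hlast : (pre ++ [(s0, e0)]).getLast? = some (s0, e0) := by simp
              rw [hlast]
              simp only [if_neg (by omega : ¬ e0 = k)]
              have h1 := ih1 (k + 1) (pre ++ [(s0, e0)]) k
              simpa [runsC] using h1
      · intro k G s
        cases o with
        | none =>
            rw [nzOf_cons_none]
            have h2 := ih2 (k + 1) (G ++ [(s, k)]) (Or.inr ⟨G, s, k, rfl, by omega⟩)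
            simp [runsC, h2]
        | some v =>
            rw [nzOf_cons_some, foldB_cons]
            have hlast : (G ++ [(s, k)]).getLast? = some (s, k) := by simp
            rw [hlast]
            simp only [List.dropLast_concat]
            have h1 := ih1 (k + 1) G s
            simpa [runsC] using h1

lemma nz_head (vals : List (Option Int)) : ∀ k,
    ((nzOf k vals).head?.map (·.2)) = firstSome vals := by
  induction vals with
  | nil => intro k; simp [nzOf_nil, firstSome]
  | cons o t ih =>
      intro k
      cases o <;> simp [nzOf_cons_none, nzOf_cons_some, firstSome, ih]

lemma nz_last (vals : List (Option Int)) : ∀ k,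
    ((nzOf k vals).getLast?.map (·.2)) = lastSome vals := by
  induction vals with
  | nil => intro k; simp [nzOf_nil, lastSome]
  | cons o t ih =>
      intro k
      cases o with
      | none =>
          have hl := ih (k + 1)
          cases h : lastSome t <;> rw [h] at hl <;>
            simp_all [nzOf_cons_none, lastSome, Option.map_eq_some_iff, Option.map_eq_none_iff]
      | some v =>
          cases h' : nzOf (k + 1) t with
          | nil =>
              have hl := ih (k + 1); rw [h'] at hl; simp at hl
              simp [nzOf_cons_some, h', lastSome, ← hl]
          | cons q r =>
              have hl := ih (k + 1); rw [h'] at hl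
              cases h : lastSome t <;> rw [h] at hl <;>
                simp_all [nzOf_cons_some, lastSome, List.getLast?_cons_cons]

lemma dimAlt_eq (vals : List (Option Int)) :
    dimAlt vals = (firstSome vals, (lastSome vals).map (· + 1), runsC none 0 vals) := by
  have h1 : dimAlt vals = ((nzOf 0 vals).head?.map (·.2),
      ((nzOf 0 vals).getLast?.map (·.2)).map (· + 1), foldB [] (nzOf 0 vals)) := rfl
  rw [h1, nz_head, nz_last, (B_runs vals).1 0 [] (Or.inl rfl)]
  simp

-- ===== VERDICT (by name: the statement is the Claim_ definition above) =====
lemma finish_zero (vals : List (Option Int)) :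
    finishRuns (foldDim ⟨false, none, none, []⟩ (PySem.List.enumerate vals 0)) ((vals.length : Int))
      = runsC none 0 vals := by
  have h := A_runs vals 0 none [] none none (by simp)
  simpa [pairUp] using h

theorem gap_traceback_spec : Claim_equal_gap_traceback := by
  intro ap hDom hPre
  unfold Spec_gap_traceback
  have hne : ap ≠ [] := hPre
  show gap_traceback ap = gap_traceback_alt ap
  simp only [gap_traceback, gap_traceback_alt]
  rw [fold_split, if_neg hne, dimAlt_eq, dimAlt_eq]
  have ha : (0 + (ap.length : Int) - 1) + 1 = (ap.length : Int) := by ring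
  simp only [ha]
  have hl1 : ((ap.map (·.1)).length : Int) = (ap.length : Int) := by simp
  have hl2 : ((ap.map (·.2)).length : Int) = (ap.length : Int) := by simp
  refine congrArg₂ Prod.mk ?_ (congrArg₂ Prod.mk ?_ (congrArg₂ Prod.mk ?_ rfl))
  · rw [A_start, A_start]
  · rw [A_stop, A_stop]
    cases lastSome (ap.map (·.1)) <;> cases lastSome (ap.map (·.2)) <;> rfl
  · have r1 := finish_zero (ap.map (·.1))
    have r2 := finish_zero (ap.map (·.2))
    rw [hl1] at r1
    rw [hl2] at r2
    exact congrArg₂ (fun a b => [a, b]) r1 r2
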